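-- pv_equiv track=rewrite | github.com/adbar/trafilatura | trafilatura/hashing.py | sample_tokens
-- ===== SOURCE A (Python) =====
-- import string
-- from typing import Any, List, Optional
--
-- def sample_tokens(inputstring: str, length: int = 64) -> List[str]:
--     """Split input into list of tokens and adjust length threshold to make sure
--     there is enough data."""
--     tokens = []
--     for token in inputstring.split():
--         token = token.strip(string.punctuation)
--         if token.isalnum():
--             tokens.append(token)
--     sample = []
--     for i in range(4, -1, -1):
--         sample = [t for t in tokens if len(t) > i]
--         if len(sample) >= length / 2:
--             return sample
--     return sample
-- ===== SOURCE B (Python) =====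
-- import string
--
-- def sample_tokens(inputstring: str, length: int = 64):
--     """Single counting pass over the tokens instead of up to five re-filterings."""
--     tokens = []
--     c1 = c2 = c3 = c4 = 0
--     for token in inputstring.split():
--         token = token.strip(string.punctuation)
--         if not token.isalnum():
--             continue
--         tokens.append(token)
--         n = len(token)
--         if n > 1:
--             c1 += 1
--         if n > 2:
--             c2 += 1
--         if n > 3:
--             c3 += 1
--         if n > 4:
--             c4 += 1
--     if 2 * c4 >= length:
--         return [t for t in tokens if len(t) > 4]
--     if 2 * c3 >= length:
--         return [t for t in tokens if len(t) > 3]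
--     if 2 * c2 >= length:
--         return [t for t in tokens if len(t) > 2]
--     if 2 * c1 >= length:
--         return [t for t in tokens if len(t) > 1]
--     return tokens
-- ===== Notes on version B (the rewrite author's own statement) =====
-- stated objective: alternative
-- what changed: Instead of rebuilding the filtered sample list up to five times (one list comprehension per threshold i=4..0), B makes a single counting pass that tallies how many tokens exceed each length threshold, picks the threshold from the four counters, and builds the result with one final filter.
import Mathlib
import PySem

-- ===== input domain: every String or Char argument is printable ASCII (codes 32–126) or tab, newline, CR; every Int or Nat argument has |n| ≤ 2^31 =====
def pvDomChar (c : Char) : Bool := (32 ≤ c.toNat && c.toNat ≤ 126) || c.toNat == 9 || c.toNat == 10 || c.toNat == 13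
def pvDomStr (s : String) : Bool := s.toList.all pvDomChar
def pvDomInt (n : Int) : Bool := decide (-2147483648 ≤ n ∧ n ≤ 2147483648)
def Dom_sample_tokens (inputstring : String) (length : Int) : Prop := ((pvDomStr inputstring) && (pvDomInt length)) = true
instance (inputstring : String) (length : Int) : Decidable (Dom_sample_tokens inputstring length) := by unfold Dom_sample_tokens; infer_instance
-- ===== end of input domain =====

-- B replaces A's up-to-five re-filterings of the token list by one counting pass
-- (four counters) followed by a single final filter; return values are identical.

-- ===== PORT A =====
-- string.punctuation
def pvPunct : String := "!\"#$%&'()*+,-./:;<=>?@[\\]^_`{|}~"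

-- A's loop 'for i in range(4, -1, -1)' with early return; sample is the carried state.
-- Python's 'len(sample) >= length / 2' (exact float comparison of an int against
-- an exact half-integer) is ported exactly as the integer comparison 2*len ≥ length.
def pvLoopA (tokens : List String) (length : Int) : List String → List Int → List String
  | sample, [] => sample
  | _, i :: rest =>
      let sample := tokens.filter (fun t => (PySem.Str.len t : Int) > i)
      if 2 * (sample.length : Int) ≥ length then sample
      else pvLoopA tokens length sample rest

def sample_tokens (inputstring : String) (length : Int) : List String :=
  let tokens := (PySem.Str.split₀ inputstring).foldl
    (fun acc token =>
      let token := PySem.Str.stripChars token pvPunct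
      if PySem.Str.strIsalnum token then acc ++ [token] else acc) []
  pvLoopA tokens length [] (PySem.List.pyRange 4 (-1) (-1))

-- ===== PORT B =====
-- B's single pass: state (tokens, c1, c2, c3, c4).
def pvStepB (st : List String × Int × Int × Int × Int) (token : String) :
    List String × Int × Int × Int × Int :=
  let token := PySem.Str.stripChars token pvPunct
  if PySem.Str.strIsalnum token then
    let n : Int := PySem.Str.len token
    (st.1 ++ [token],
     st.2.1 + (if n > 1 then 1 else 0),
     st.2.2.1 + (if n > 2 then 1 else 0),
     st.2.2.2.1 + (if n > 3 then 1 else 0),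
     st.2.2.2.2 + (if n > 4 then 1 else 0))
  else st

def sample_tokens_alt (inputstring : String) (length : Int) : List String :=
  let st := (PySem.Str.split₀ inputstring).foldl pvStepB ([], 0, 0, 0, 0)
  let tokens := st.1
  if 2 * st.2.2.2.2 ≥ length then tokens.filter (fun t => (PySem.Str.len t : Int) > 4)
  else if 2 * st.2.2.2.1 ≥ length then tokens.filter (fun t => (PySem.Str.len t : Int) > 3)
  else if 2 * st.2.2.1 ≥ length then tokens.filter (fun t => (PySem.Str.len t : Int) > 2)
  else if 2 * st.2.1 ≥ length then tokens.filter (fun t => (PySem.Str.len t : Int) > 1)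
  else tokens

-- ===== PRECONDITION & SPEC =====
def Spec_sample_tokens (inputstring : String) (length : Int) (out : List String) : Prop := out = sample_tokens_alt inputstring length
instance (inputstring : String) (length : Int) (out : List String) : Decidable (Spec_sample_tokens inputstring length out) := by unfold Spec_sample_tokens; infer_instance

-- ===== CLAIM (what is proved, stated in full; the proofs are below) =====
def Claim_equal_sample_tokens : Prop := ∀ (inputstring : String) (length : Int), Dom_sample_tokens inputstring length → Spec_sample_tokens inputstring length (sample_tokens inputstring length)

-- ===== LEMMAS AND PROOFS =====

-- B's fold, unfolded: tokens are A's tokens, each counter counts tokens of length > k.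
theorem pvFoldB_spec (ws : List String) (acc : List String) (c1 c2 c3 c4 : Int) :
    ws.foldl pvStepB (acc, c1, c2, c3, c4) =
      (let M := (ws.filter (fun w => PySem.Str.strIsalnum (PySem.Str.stripChars w pvPunct))).map
                  (fun w => PySem.Str.stripChars w pvPunct)
       (acc ++ M,
        c1 + (M.countP (fun t => (PySem.Str.len t : Int) > 1) : Int),
        c2 + (M.countP (fun t => (PySem.Str.len t : Int) > 2) : Int),
        c3 + (M.countP (fun t => (PySem.Str.len t : Int) > 3) : Int),
        c4 + (M.countP (fun t => (PySem.Str.len t : Int) > 4) : Int))) := by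
  induction ws generalizing acc c1 c2 c3 c4 with
  | nil => simp
  | cons w ws ih =>
      by_cases h : PySem.Str.strIsalnum (PySem.Str.stripChars w pvPunct) = true
      · simp only [List.foldl_cons, pvStepB, h, if_true, ih, List.filter_cons,
          List.map_cons, List.countP_cons]
        refine Prod.ext (by simp) (Prod.ext ?_ (Prod.ext ?_ (Prod.ext ?_ ?_))) <;>
          dsimp only <;> split_ifs <;>
          (try simp only [decide_eq_true_eq] at *) <;> push_cast <;> omega
      · simp only [List.foldl_cons, pvStepB, h, if_false, ih, List.filter_cons,
          Bool.false_eq_true]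

-- a token that passes isalnum() is nonempty
theorem pvAlnum_len_pos (t : String) (h : PySem.Str.strIsalnum t = true) :
    0 < PySem.Str.len t := by
  rw [PySem.Str.len_eq]
  cases ht : t.toList with
  | nil => rw [PySem.Str.strIsalnum_eq, ht] at h; simp [PySem.Chars.strIsalnum] at h
  | cons a l => simp

theorem sample_tokens_spec : Claim_equal_sample_tokens := by
  intro inputstring length _
  unfold Spec_sample_tokens sample_tokens sample_tokens_alt
  rw [pvFoldB_spec (PySem.Str.split₀ inputstring) [] 0 0 0 0]
  dsimp only
  rw [show PySem.List.pyRange 4 (-1) (-1) = [4, 3, 2, 1, 0] from by decide]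
  rw [PySem.List.foldl_append_if]
  simp only [List.nil_append, zero_add, pvLoopA, List.countP_eq_length_filter]
  set M := (List.filter (fun w => PySem.Str.strIsalnum (PySem.Str.stripChars w pvPunct))
      (PySem.Str.split₀ inputstring)).map (fun w => PySem.Str.stripChars w pvPunct) with hMdef
  have hM : M.filter (fun t => decide ((PySem.Str.len t : Int) > 0)) = M := by
    apply List.filter_eq_self.mpr
    intro t htm
    rw [hMdef] at htm
    obtain ⟨w, hw, rfl⟩ := List.mem_map.mp htm
    have := List.of_mem_filter hw
    have hpos := pvAlnum_len_pos _ this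
    simp only [decide_eq_true_eq]
    exact_mod_cast hpos
  split_ifs <;> first | rfl | exact hM
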